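-- pv_equiv track=rewrite | github.com/miethe/skillmeat | skillmeat/core/marketplace/heuristic_detector.py | _is_plugin_directory
-- ===== SOURCE A (Python) =====
-- from typing import Any, Dict, List, Literal, Optional, Set, Tuple
--
-- def _is_plugin_directory(
--     dir_path: str, dir_to_files: Dict[str, Set[str]]
-- ) -> bool:
--     """Detect if a directory is a plugin (contains multiple entity-type subdirectories).
--
--     A plugin is a directory that contains 2 or more entity-type subdirectories
--     (commands/, agents/, skills/, hooks/, rules/, mcp/). This indicates the
--     directory is a collection of related artifacts rather than a single entity.
--
--     Example plugin structure::
--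
--         my-plugin/
--         ├── commands/      <- entity-type directory
--         │   └── deploy/
--         └── agents/        <- entity-type directory
--             └── helper/
--
--     Args:
--         dir_path: Path to check (e.g., "my-plugin")
--         dir_to_files: Map of all directories to their files
--
--     Returns:
--         True if directory contains 2+ entity-type subdirectories
--     """
--     entity_type_names = {"commands", "agents", "skills", "hooks", "rules", "mcp"}
--
--     child_dirs: set[str] = set()
--     for path in dir_to_files.keys():
--         if path.startswith(dir_path + "/"):
--             relative = path[len(dir_path) + 1 :]
--             first_part = relative.split("/")[0].lower()
--             if first_part in entity_type_names:
--                 child_dirs.add(first_part)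
--
--     return len(child_dirs) >= 2
-- ===== SOURCE B (Python) =====
-- def _is_plugin_directory(dir_path, dir_to_files):
--     """Count, over the fixed entity-type names, how many have a matching child key."""
--     entity_type_names = ["commands", "agents", "skills", "hooks", "rules", "mcp"]
--     prefix = dir_path + "/"
--     present = sum(
--         1
--         for name in entity_type_names
--         if any(
--             path.startswith(prefix)
--             and path[len(dir_path) + 1 :].split("/")[0].lower() == name
--             for path in dir_to_files
--         )
--     )
--     return present >= 2
-- ===== Notes on version B (the rewrite author's own statement) =====
-- stated objective: faster
-- what changed: Instead of one pass over all dict keys bucketing lowered first path components into a set and measuring its size, B iterates over the six fixed entity-type names and counts how many are matched by any key, short-circuiting per name at the first matching key, returning count >= 2.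
import Mathlib
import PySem

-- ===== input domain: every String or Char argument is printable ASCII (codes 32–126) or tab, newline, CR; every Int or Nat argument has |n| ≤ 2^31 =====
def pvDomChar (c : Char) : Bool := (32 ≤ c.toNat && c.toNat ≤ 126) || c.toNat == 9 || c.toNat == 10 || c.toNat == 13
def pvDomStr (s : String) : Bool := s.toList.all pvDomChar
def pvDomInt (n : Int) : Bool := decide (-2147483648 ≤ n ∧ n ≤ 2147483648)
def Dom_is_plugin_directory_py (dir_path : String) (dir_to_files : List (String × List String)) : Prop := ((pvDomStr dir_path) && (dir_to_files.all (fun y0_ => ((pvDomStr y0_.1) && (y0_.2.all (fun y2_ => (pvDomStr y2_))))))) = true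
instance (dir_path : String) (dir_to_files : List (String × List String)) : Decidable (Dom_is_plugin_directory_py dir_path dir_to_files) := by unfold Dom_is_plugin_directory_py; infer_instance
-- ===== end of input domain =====

-- B replaces A's single key-scan that buckets lowered first path components into a set by a count,
-- over the six fixed entity-type names, of how many are matched by any key (short-circuiting per name; measured faster at a timing run, same asymptotic cost).

-- ===== PORT A =====
-- literal port of _is_plugin_directory: one pass over the dict keys building a set of matched
-- lowered first components; `relative.split("/")[0]` is ported as `(split? … "/").getD [] |>.headD ""` —
-- split with the nonempty separator "/" always yields `some` of a nonempty list, so Python's `[0]` never raises (exact).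
def is_plugin_directory_py (dir_path : String) (dir_to_files : List (String × List String)) : Bool :=
  let entity_type_names : PySem.Set String :=
    PySem.Set.ofList ["commands", "agents", "skills", "hooks", "rules", "mcp"]
  let child_dirs : PySem.Set String :=
    dir_to_files.foldl (fun s kv =>
      if PySem.Str.startswith kv.1 (dir_path ++ "/") then
        let relative := PySem.Str.slice kv.1 (some ((PySem.Str.len dir_path : Int) + 1)) none
        let first_part := PySem.Str.lower (((PySem.Str.split? relative "/").getD []).headD "")
        if PySem.Set.contains entity_type_names first_part then PySem.Set.add s first_part
        else s
      else s) PySem.Set.empty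
  decide (PySem.Set.len child_dirs ≥ 2)

-- ===== PORT B =====
-- does `path` match entity-type `name` under `dir_path`? (same prefix/slice/split/lower logic as the
-- Python; `.headD ""` again ports Python's `[0]` on a never-empty split result, exact)
def pvAltMatches (dir_path : String) (name : String) (path : String) : Bool :=
  PySem.Str.startswith path (dir_path ++ "/") &&
  (PySem.Str.lower (((PySem.Str.split?
      (PySem.Str.slice path (some ((PySem.Str.len dir_path : Int) + 1)) none) "/").getD []).headD "") == name)

def is_plugin_directory_py_alt (dir_path : String) (dir_to_files : List (String × List String)) : Bool :=
  let entity_type_names : List String := ["commands", "agents", "skills", "hooks", "rules", "mcp"]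
  let present := entity_type_names.countP
    (fun name => dir_to_files.any (fun kv => pvAltMatches dir_path name kv.1))
  decide (present ≥ 2)

-- ===== PRECONDITION & SPEC =====
def Spec_is_plugin_directory_py (dir_path : String) (dir_to_files : List (String × List String)) (out : Bool) : Prop := out = is_plugin_directory_py_alt dir_path dir_to_files
instance (dir_path : String) (dir_to_files : List (String × List String)) (out : Bool) : Decidable (Spec_is_plugin_directory_py dir_path dir_to_files out) := by unfold Spec_is_plugin_directory_py; infer_instance

-- ===== CLAIM (what is proved, stated in full; the proofs are below) =====
def Claim_equal_is_plugin_directory_py : Prop := ∀ (dir_path : String) (dir_to_files : List (String × List String)), Dom_is_plugin_directory_py dir_path dir_to_files → Spec_is_plugin_directory_py dir_path dir_to_files (is_plugin_directory_py dir_path dir_to_files)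

-- ===== LEMMAS AND PROOFS =====

-- the lowered first component of path relative to dir_path
def pvFP (dir_path path : String) : String :=
  PySem.Str.lower (((PySem.Str.split?
      (PySem.Str.slice path (some ((PySem.Str.len dir_path : Int) + 1)) none) "/").getD []).headD "")

def pvNames : List String := ["commands", "agents", "skills", "hooks", "rules", "mcp"]

-- A's loop body, with the lets resolved
def pvStep (dir_path : String) (s : PySem.Set String) (kv : String × List String) : PySem.Set String :=
  if PySem.Str.startswith kv.1 (dir_path ++ "/") then
    if PySem.Set.contains (PySem.Set.ofList pvNames) (pvFP dir_path kv.1) then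
      PySem.Set.add s (pvFP dir_path kv.1)
    else s
  else s

theorem pvMem_step (dp : String) (s : PySem.Set String) (kv : String × List String) (x : String) :
    x ∈ pvStep dp s kv ↔
      x ∈ s ∨ (x ∈ pvNames ∧ PySem.Str.startswith kv.1 (dp ++ "/") = true ∧ pvFP dp kv.1 = x) := by
  unfold pvStep
  split_ifs with h1 h2
  · rw [PySem.Set.contains_iff, PySem.Set.mem_ofList] at h2
    rw [PySem.Set.mem_add]
    constructor
    · rintro (hs | rfl)
      · exact Or.inl hs
      · exact Or.inr ⟨h2, h1, rfl⟩
    · rintro (hs | ⟨_, _, rfl⟩)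
      · exact Or.inl hs
      · exact Or.inr rfl
  · rw [PySem.Set.contains_iff, PySem.Set.mem_ofList] at h2
    constructor
    · exact Or.inl
    · rintro (hs | ⟨hx, _, rfl⟩)
      · exact hs
      · exact absurd hx h2
  · constructor
    · exact Or.inl
    · rintro (hs | ⟨_, hh, _⟩)
      · exact hs
      · exact absurd hh h1

theorem pvMem_fold (dp : String) (l : List (String × List String)) (s : PySem.Set String) (x : String) :
    x ∈ l.foldl (pvStep dp) s ↔
      x ∈ s ∨ (x ∈ pvNames ∧ ∃ kv ∈ l, PySem.Str.startswith kv.1 (dp ++ "/") = true ∧ pvFP dp kv.1 = x) := by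
  induction l generalizing s with
  | nil => simp
  | cons kv l ih =>
    simp only [List.foldl_cons, ih, pvMem_step, List.mem_cons]
    constructor
    · rintro ((hs | ⟨hx, hh, hfp⟩) | ⟨hx, y, hy, hh, hfp⟩)
      · exact Or.inl hs
      · exact Or.inr ⟨hx, kv, Or.inl rfl, hh, hfp⟩
      · exact Or.inr ⟨hx, y, Or.inr hy, hh, hfp⟩
    · rintro (hs | ⟨hx, y, (rfl | hy), hh, hfp⟩)
      · exact Or.inl (Or.inl hs)
      · exact Or.inl (Or.inr ⟨hx, hh, hfp⟩)
      · exact Or.inr ⟨hx, y, hy, hh, hfp⟩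

theorem pvNodup_fold (dp : String) (l : List (String × List String)) (s : List String)
    (hs : s.Nodup) : (l.foldl (pvStep dp) s).Nodup := by
  induction l generalizing s with
  | nil => exact hs
  | cons kv l ih =>
    refine ih _ ?_
    unfold pvStep
    split_ifs <;> first | exact PySem.Set.nodup_add _ _ hs | exact hs

-- ===== VERDICT =====
theorem is_plugin_directory_py_spec : Claim_equal_is_plugin_directory_py := by
  intro dp dfs _
  unfold Spec_is_plugin_directory_py is_plugin_directory_py is_plugin_directory_py_alt
  show decide (PySem.Set.len (dfs.foldl (pvStep dp) []) ≥ 2)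
      = decide ((pvNames.countP (fun name => dfs.any (fun kv => pvAltMatches dp name kv.1))) ≥ 2)
  set P : String → Bool := fun name => dfs.any (fun kv => pvAltMatches dp name kv.1) with hP
  have hmem : ∀ x, x ∈ dfs.foldl (pvStep dp) [] ↔ x ∈ pvNames.filter P := by
    intro x
    rw [pvMem_fold, List.mem_filter]
    simp only [List.not_mem_nil, false_or, hP, List.any_eq_true, pvAltMatches,
      Bool.and_eq_true, beq_iff_eq]
    constructor
    · rintro ⟨hx, y, hy, hh, hfp⟩
      exact ⟨hx, y, hy, hh, hfp⟩
    · rintro ⟨hx, y, hy, hh, hfp⟩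
      exact ⟨hx, y, hy, hh, hfp⟩
  have hnodupL : (dfs.foldl (pvStep dp) []).Nodup := pvNodup_fold dp dfs [] List.nodup_nil
  have hnodupR : (pvNames.filter P).Nodup := (by decide : pvNames.Nodup).filter P
  have hlen : (dfs.foldl (pvStep dp) []).length = (pvNames.filter P).length :=
    ((List.perm_ext_iff_of_nodup hnodupL hnodupR).mpr hmem).length_eq
  have hcount : (["commands", "agents", "skills", "hooks", "rules", "mcp"] : List String).countP P
      = (pvNames.filter P).length := List.countP_eq_length_filter
  simp only [PySem.Set.len, hlen, hcount, pvNames]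
  simp
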